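-- pv_equiv track=rewrite | github.com/tovetangring/TNM096 | lab3/taskA.py | incorporate_clause
-- ===== SOURCE A (Python) =====
-- import copy
--
-- def incorporate_clause(A, kb):
--     for B in copy.deepcopy(kb):
--         if B <= A:
--             return kb
--     for B in copy.deepcopy(kb):
--         if A <= B:
--             kb.remove(B)
--     kb.append(A)
--     return kb
-- ===== SOURCE B (Python) =====
-- def incorporate_clause(A, kb):
--     keep = []
--     for B in kb:
--         if B <= A:
--             return kb
--         if not A <= B:
--             keep.append(B)
--     keep.append(A)
--     kb[:] = keep
--     return kb
-- ===== Notes on version B (the rewrite author's own statement) =====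
-- stated objective: simpler
-- what changed: Replaces A's two deepcopy-driven passes (subsumption scan, then destructive remove-while-iterating over a copy) with one early-returning pass that builds a fresh 'keep' list and assigns it back with kb[:] = keep, needing no copies and no list.remove.
import Mathlib
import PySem

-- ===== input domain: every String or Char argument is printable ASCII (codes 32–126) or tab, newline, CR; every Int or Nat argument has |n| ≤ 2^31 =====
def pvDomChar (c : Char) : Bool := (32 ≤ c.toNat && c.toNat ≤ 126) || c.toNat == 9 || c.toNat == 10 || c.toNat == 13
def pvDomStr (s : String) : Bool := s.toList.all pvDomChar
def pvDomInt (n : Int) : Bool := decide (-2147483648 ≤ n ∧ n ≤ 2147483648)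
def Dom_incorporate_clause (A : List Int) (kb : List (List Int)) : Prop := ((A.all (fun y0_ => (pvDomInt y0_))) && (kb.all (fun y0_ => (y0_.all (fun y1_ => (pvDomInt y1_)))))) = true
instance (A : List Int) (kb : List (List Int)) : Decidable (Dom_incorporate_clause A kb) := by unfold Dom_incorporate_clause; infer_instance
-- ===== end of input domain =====

-- B fuses A's two passes (subsumption check, then remove-superset loop over a deepcopy)
-- into one early-returning pass building a fresh 'keep' list; equivalence is about the
-- RETURN value (both Pythons also leave kb equal to the returned list).

-- Python's `s <= t` on SETS is the subset test (shared builtin helper: PySem.Set.issubset).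
-- A is a set of ints, kb a list of sets; per the type convention sets are distinct-element lists.

-- ===== PORT A =====
-- first loop: `for B in copy.deepcopy(kb): if B <= A: return kb`
def aFirstLoop (A : List Int) : List (List Int) → Bool
  | [] => false
  | B :: rest => if PySem.Set.issubset B A then true else aFirstLoop A rest
-- `kb.remove(B)`: list.remove compares sets with `==` (PySem.Set.equal); the ValueError
-- branch (no match) is unreachable since B is drawn from a copy of kb, so [] stands for it
def pyRemove : List (List Int) → List Int → List (List Int)
  | [], _ => []
  | x :: xs, B => if PySem.Set.equal x B then xs else x :: pyRemove xs B
-- second loop: `for B in copy.deepcopy(kb): if A <= B: kb.remove(B)`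
def aRemoveLoop (A : List Int) : List (List Int) → List (List Int) → List (List Int)
  | [], kb => kb
  | B :: rest, kb =>
      if PySem.Set.issubset A B then aRemoveLoop A rest (pyRemove kb B)
      else aRemoveLoop A rest kb

def incorporate_clause (A : List Int) (kb : List (List Int)) : List (List Int) :=
  if aFirstLoop A kb then kb else aRemoveLoop A kb kb ++ [A]

-- ===== PORT B =====
def bLoop (A : List Int) (kb : List (List Int)) : List (List Int) → List (List Int) → List (List Int)
  | [], keep => keep ++ [A]
  | B :: rest, keep =>
      if PySem.Set.issubset B A then kb
      else if !PySem.Set.issubset A B then bLoop A kb rest (keep ++ [B])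
      else bLoop A kb rest keep

def incorporate_clause_alt (A : List Int) (kb : List (List Int)) : List (List Int) :=
  bLoop A kb kb []

-- ===== PRECONDITION & SPEC =====
def Spec_incorporate_clause (A : List Int) (kb : List (List Int)) (out : List (List Int)) : Prop := out = incorporate_clause_alt A kb
instance (A : List Int) (kb : List (List Int)) (out : List (List Int)) : Decidable (Spec_incorporate_clause A kb out) := by unfold Spec_incorporate_clause; infer_instance

-- ===== CLAIM (what is proved, stated in full; the proofs are below) =====
def Claim_equal_incorporate_clause : Prop := ∀ (A : List Int) (kb : List (List Int)), Dom_incorporate_clause A kb → Spec_incorporate_clause A kb (incorporate_clause A kb)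

-- ===== LEMMAS AND PROOFS =====

-- if no element of f is set-equal to B, removing B from f ++ B :: rest yields f ++ rest
lemma remove_skip_prefix (f rest : List (List Int)) (B : List Int)
    (h : ∀ x ∈ f, PySem.Set.equal x B = false) :
    pyRemove (f ++ B :: rest) B = f ++ rest := by
  induction f with
  | nil =>
      have : PySem.Set.equal B B = true := (PySem.Set.equal_iff B B).2 (fun x => Iff.rfl)
      simp [pyRemove, this]
  | cons x xs ih =>
      have hx := h x (by simp)
      simp only [List.cons_append, pyRemove, hx, if_false, Bool.false_eq_true]
      rw [ih (fun y hy => h y (by simp [hy]))]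

-- a set with A ⊆ ·  is never set-equal to one without
lemma equal_false_of_issubset (A B C : List Int)
    (hB : PySem.Set.issubset A B = true) (hC : PySem.Set.issubset A C = false) :
    PySem.Set.equal C B = false := by
  by_contra hc
  have he : PySem.Set.equal C B = true := by simpa using hc
  have hmem := (PySem.Set.equal_iff C B).1 he
  have hsub := (PySem.Set.issubset_iff A B).1 hB
  have : PySem.Set.issubset A C = true :=
    (PySem.Set.issubset_iff A C).2 (fun x hx => (hmem x).2 (hsub x hx))
  simp [this] at hC

-- invariant of A's second loop: the already-kept prefix f (all failing A ≤ ·) stays,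
-- the rest is filtered
lemma aRemoveLoop_eq (A : List Int) : ∀ (copy f : List (List Int)),
    (∀ x ∈ f, PySem.Set.issubset A x = false) →
    aRemoveLoop A copy (f ++ copy) = f ++ copy.filter (fun B => !PySem.Set.issubset A B) := by
  intro copy
  induction copy with
  | nil => intro f _; simp [aRemoveLoop]
  | cons B rest ih =>
      intro f hf
      by_cases h : PySem.Set.issubset A B = true
      · have := remove_skip_prefix f rest B (fun x hx => equal_false_of_issubset A B x h (hf x hx))
        simp [aRemoveLoop, h, this, ih f hf]
      · have h' : PySem.Set.issubset A B = false := Bool.eq_false_iff.2 h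
        have hsplit : f ++ B :: rest = (f ++ [B]) ++ rest := by simp
        rw [aRemoveLoop, hsplit, if_neg (by simp [h']),
          ih (f ++ [B]) (by intro x hx; rcases List.mem_append.1 hx with hx | hx
                            · exact hf x hx
                            · simp at hx; simpa [hx] using h')]
        simp [h']

lemma bLoop_true (A : List Int) (kb : List (List Int)) : ∀ rest keep,
    aFirstLoop A rest = true → bLoop A kb rest keep = kb := by
  intro rest
  induction rest with
  | nil => intro keep h; simp [aFirstLoop] at h
  | cons B rs ih =>
      intro keep h
      by_cases hB : PySem.Set.issubset B A = true
      · simp [bLoop, hB]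
      · have h' : aFirstLoop A rs = true := by simpa [aFirstLoop, hB] using h
        by_cases hAB : PySem.Set.issubset A B = true
        · simp [bLoop, hB, hAB, ih _ h']
        · simp [bLoop, hB, hAB, ih _ h']

lemma bLoop_false (A : List Int) (kb : List (List Int)) : ∀ rest keep,
    aFirstLoop A rest = false →
    bLoop A kb rest keep = keep ++ rest.filter (fun B => !PySem.Set.issubset A B) ++ [A] := by
  intro rest
  induction rest with
  | nil => intro keep _; simp [bLoop]
  | cons B rs ih =>
      intro keep h
      have hB : PySem.Set.issubset B A = false := by
        by_contra hc; simp [aFirstLoop, eq_true_of_ne_false hc] at h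
      have h' : aFirstLoop A rs = false := by simpa [aFirstLoop, hB] using h
      by_cases hAB : PySem.Set.issubset A B = true
      · simp [bLoop, hB, hAB, ih _ h']
      · have hAB' : PySem.Set.issubset A B = false := Bool.eq_false_iff.2 hAB
        simp [bLoop, hB, hAB', ih _ h']

-- ===== VERDICT (by name: the statement is the Claim_ definition above) =====
theorem incorporate_clause_spec : Claim_equal_incorporate_clause := by
  intro A kb _
  unfold Spec_incorporate_clause incorporate_clause incorporate_clause_alt
  by_cases h : aFirstLoop A kb = true
  · rw [if_pos h, bLoop_true A kb kb [] h]
  · have h' : aFirstLoop A kb = false := by simpa using h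
    rw [if_neg (by simp [h']), bLoop_false A kb kb [] h']
    have := aRemoveLoop_eq A kb [] (by simp)
    simp at this
    simp [this]
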